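-- pv_equiv track=rewrite | github.com/Luc4sfdez/sdk_fastapi | fastapi_microservices_sdk/observability/alerting/intelligent/correlation.py | _are_services_related
-- ===== SOURCE A (Python) =====
-- def _are_services_related(service1: str, service2: str) -> bool:
--     """Check if two services are related."""
--     # Simple heuristic - services with similar names are related
--     if service1 == service2:
--         return True
--
--     # Check for common prefixes/suffixes
--     common_prefixes = ['api', 'web', 'auth', 'user', 'order', 'payment']
--
--     for prefix in common_prefixes:
--         if service1.startswith(prefix) and service2.startswith(prefix):
--             return True
--
--     return False
-- ===== SOURCE B (Python) =====
-- _COMMON_PREFIXES = ['api', 'web', 'auth', 'user', 'order', 'payment']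
--
--
-- def _group(service):
--     """First common prefix the service name starts with, or None."""
--     return next((p for p in _COMMON_PREFIXES if service.startswith(p)), None)
--
--
-- def _are_services_related(service1: str, service2: str) -> bool:
--     """Check if two services are related."""
--     if service1 == service2:
--         return True
--     g1 = _group(service1)
--     return g1 is not None and g1 == _group(service2)
-- ===== Notes on version B (the rewrite author's own statement) =====
-- stated objective: alternative
-- what changed: Instead of one scan over the prefix list testing both names together, B classifies each name separately into its prefix group (first matching prefix or None) and returns whether the two non-None group labels are equal, keeping the equality early-return.
import Mathlib
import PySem

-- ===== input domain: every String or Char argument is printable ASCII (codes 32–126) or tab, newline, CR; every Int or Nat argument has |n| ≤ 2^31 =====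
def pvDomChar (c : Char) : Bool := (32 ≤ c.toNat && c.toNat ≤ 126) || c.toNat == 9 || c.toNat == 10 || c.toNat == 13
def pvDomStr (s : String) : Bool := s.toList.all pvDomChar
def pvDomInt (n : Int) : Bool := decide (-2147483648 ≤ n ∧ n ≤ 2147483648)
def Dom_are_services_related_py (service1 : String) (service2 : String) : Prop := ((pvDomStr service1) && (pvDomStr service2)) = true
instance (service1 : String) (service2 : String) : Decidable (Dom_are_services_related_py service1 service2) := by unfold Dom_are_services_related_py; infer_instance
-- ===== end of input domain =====

-- B classifies each name separately into its prefix group (first matching common prefix, or none)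
-- and compares the two group labels, instead of A's single scan testing both names per prefix
-- (objective: alternative decomposition, same cost).

-- ===== PORT A =====
-- the fixed list of common prefixes from A
def pvPrefixes : List String := ["api", "web", "auth", "user", "order", "payment"]

-- the 'for prefix in common_prefixes' loop of A, with its early return
def pvLoopA (service1 : String) (service2 : String) : List String → Bool
  | [] => false
  | p :: rest =>
      if PySem.Str.startswith service1 p && PySem.Str.startswith service2 p then true
      else pvLoopA service1 service2 rest

def are_services_related_py (service1 : String) (service2 : String) : Bool :=
  if service1 == service2 then true
  else pvLoopA service1 service2 pvPrefixes

-- ===== PORT B =====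
-- _group: first common prefix the service name starts with, or None
def pvGroup (service : String) : Option String :=
  pvPrefixes.find? (fun p => PySem.Str.startswith service p)

def are_services_related_py_alt (service1 : String) (service2 : String) : Bool :=
  if service1 == service2 then true
  else
    match pvGroup service1 with
    | none => false
    | some g1 => pvGroup service2 == some g1

-- ===== PRECONDITION & SPEC =====
def Spec_are_services_related_py (service1 : String) (service2 : String) (out : Bool) : Prop := out = are_services_related_py_alt service1 service2
instance (service1 : String) (service2 : String) (out : Bool) : Decidable (Spec_are_services_related_py service1 service2 out) := by unfold Spec_are_services_related_py; infer_instance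

-- ===== CLAIM (what is proved, stated in full; the proofs are below) =====
def Claim_equal_are_services_related_py : Prop := ∀ (service1 : String) (service2 : String), Dom_are_services_related_py service1 service2 → Spec_are_services_related_py service1 service2 (are_services_related_py service1 service2)

-- ===== LEMMAS AND PROOFS =====

-- each string starts with at most one of the six prefixes (no two of them are comparable)
lemma pv_uniq (s p q : String) (hp' : p ∈ pvPrefixes) (hq' : q ∈ pvPrefixes)
    (hp : PySem.Str.startswith s p = true) (hq : PySem.Str.startswith s q = true) : p = q := by
  have hcomp : p.toList <+: q.toList ∨ q.toList <+: p.toList := by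
    rw [PySem.Str.startswith_eq, PySem.Chars.startswith_iff] at hp hq
    exact List.prefix_or_prefix_of_prefix hp hq
  simp only [pvPrefixes, List.mem_cons, List.not_mem_nil, or_false] at hp' hq'
  rcases hp' with rfl | rfl | rfl | rfl | rfl | rfl <;>
    rcases hq' with rfl | rfl | rfl | rfl | rfl | rfl <;>
      first
        | rfl
        | (exfalso; revert hcomp; decide)

-- A's loop searches for a prefix matching BOTH names
lemma pvLoopA_eq_true_iff (s1 s2 : String) (L : List String) :
    pvLoopA s1 s2 L = true ↔
      ∃ p ∈ L, PySem.Str.startswith s1 p = true ∧ PySem.Str.startswith s2 p = true := by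
  induction L with
  | nil => simp [pvLoopA]
  | cons p rest ih =>
      simp only [pvLoopA, List.mem_cons]
      split_ifs with h
      · simp only [Bool.and_eq_true] at h
        simp only [true_iff]
        exact ⟨p, Or.inl rfl, h⟩
      · rw [ih]
        constructor
        · rintro ⟨q, hq, hsw⟩; exact ⟨q, Or.inr hq, hsw⟩
        · rintro ⟨q, hq | hq, hsw⟩
          · subst hq; exact (h (by simp only [hsw.1, hsw.2, Bool.and_self])).elim
          · exact ⟨q, hq, hsw⟩

theorem pv_main (s1 s2 : String) :
    are_services_related_py s1 s2 = are_services_related_py_alt s1 s2 := by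
  unfold are_services_related_py are_services_related_py_alt
  split_ifs with h
  · rfl
  cases hg1 : pvGroup s1 with
  | none =>
      have hnone : ∀ p ∈ pvPrefixes, ¬ PySem.Str.startswith s1 p = true := by
        intro p hp
        have := List.find?_eq_none.mp hg1 p hp
        simpa using this
      simp only
      rw [← Bool.not_eq_true, pvLoopA_eq_true_iff]
      rintro ⟨p, hp, hsw1, _⟩
      exact hnone p hp hsw1
  | some g1 =>
      have hg1mem : g1 ∈ pvPrefixes := List.mem_of_find?_eq_some hg1
      have hg1sw : PySem.Str.startswith s1 g1 = true := by
        have := List.find?_some hg1; simpa using this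
      cases hg2 : pvGroup s2 with
      | none =>
          have hnone : ∀ p ∈ pvPrefixes, ¬ PySem.Str.startswith s2 p = true := by
            intro p hp
            have := List.find?_eq_none.mp hg2 p hp
            simpa using this
          have : pvLoopA s1 s2 pvPrefixes = false := by
            rw [← Bool.not_eq_true, pvLoopA_eq_true_iff]
            rintro ⟨p, hp, _, hsw2⟩
            exact hnone p hp hsw2
          simp [this]
      | some g2 =>
          have hg2mem : g2 ∈ pvPrefixes := List.mem_of_find?_eq_some hg2
          have hg2sw : PySem.Str.startswith s2 g2 = true := by
            have := List.find?_some hg2; simpa using this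
          by_cases hgg : g2 = g1
          · subst hgg
            have : pvLoopA s1 s2 pvPrefixes = true :=
              (pvLoopA_eq_true_iff s1 s2 pvPrefixes).mpr ⟨g2, hg2mem, hg1sw, hg2sw⟩
            simp [this]
          · have : pvLoopA s1 s2 pvPrefixes = false := by
              rw [← Bool.not_eq_true, pvLoopA_eq_true_iff]
              rintro ⟨p, hp, hsw1, hsw2⟩
              exact hgg ((pv_uniq s2 g2 p hg2mem hp hg2sw hsw2).trans
                (pv_uniq s1 p g1 hp hg1mem hsw1 hg1sw))
            simp [this, hgg]

-- ===== VERDICT (by name: the statement is the Claim_ definition above) =====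
theorem are_services_related_py_spec : Claim_equal_are_services_related_py := by
  intro s1 s2 _
  exact pv_main s1 s2
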